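-- pv_equiv track=rewrite | github.com/yjsayya/Algorithms | 1. Programmers/lv1/lv1(정답률59%이하)/lv1_숫자짝궁.py | solution
-- ===== SOURCE A (Python) =====
-- def solution(X, Y):
--
--     liy = list(Y)
--     answer = []
--
--     for i in X:
--         if i in liy:
--             answer.append(i)
--             liy.remove(i)
--
--     if len(answer) == 0:
--         return "-1"
--     elif len(answer) == answer.count('0'):
--         return "0"
--     else:
--         return ''.join(sorted(answer, reverse=True))
-- ===== SOURCE B (Python) =====
-- def solution(X, Y):
--     cx = {}
--     for c in X:
--         cx[c] = cx.get(c, 0) + 1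
--     cy = {}
--     for c in Y:
--         cy[c] = cy.get(c, 0) + 1
--     out = []
--     for c in sorted(cx, reverse=True):
--         if c in cy:
--             out.append(c * min(cx[c], cy[c]))
--     res = ''.join(out)
--     if not res:
--         return "-1"
--     if res.count('0') == len(res):
--         return "0"
--     return res
-- ===== Notes on version B (the rewrite author's own statement) =====
-- stated objective: faster
-- what changed: Replaces the per-character scan-and-remove over a copy of Y (quadratic) with two frequency dictionaries and one pass over the sorted distinct characters of X, emitting each common character min(count) times in descending order.
import Mathlib
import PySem

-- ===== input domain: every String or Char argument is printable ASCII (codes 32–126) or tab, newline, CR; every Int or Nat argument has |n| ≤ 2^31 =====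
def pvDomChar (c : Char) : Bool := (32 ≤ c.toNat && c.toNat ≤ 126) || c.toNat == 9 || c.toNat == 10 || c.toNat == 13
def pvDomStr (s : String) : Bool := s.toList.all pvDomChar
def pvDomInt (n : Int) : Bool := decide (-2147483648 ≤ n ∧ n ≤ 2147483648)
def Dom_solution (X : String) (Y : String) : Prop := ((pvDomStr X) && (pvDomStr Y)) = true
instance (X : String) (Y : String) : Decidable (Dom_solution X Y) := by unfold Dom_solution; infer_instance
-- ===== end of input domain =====

-- B replaces A's per-character scan-and-remove over a copy of Y with two frequency
-- dictionaries and one pass over the sorted distinct characters of X (objective: faster).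

-- ===== PORT A =====
-- the body of A's for-loop over X: test membership in liy, append and remove the first occurrence
def solAStep (st : List Char × List Char) (i : Char) : List Char × List Char :=
  if i ∈ st.2 then
    (st.1 ++ [i], match PySem.List.remove? st.2 i with | some l => l | none => st.2)
  else st

def solution (X : String) (Y : String) : String :=
  let liy := Y.toList
  let st := X.toList.foldl solAStep ([], liy)
  let answer := st.1
  if answer.length = 0 then "-1"
  else if answer.length = answer.count '0' then "0"
  else String.ofList (PySem.List.sorted answer (fun x => x) true)

-- ===== PORT B =====
def solution_alt (X : String) (Y : String) : String :=
  let cx := X.toList.foldl (fun d c => d.insert c (d.getD c 0 + 1)) (PySem.Dict.empty : PySem.Dict Char Int)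
  let cy := Y.toList.foldl (fun d c => d.insert c (d.getD c 0 + 1)) (PySem.Dict.empty : PySem.Dict Char Int)
  let out := (PySem.List.sorted cx.keys (fun x => x) true).foldl
      (fun acc c => if cy.contains c then acc ++ [List.replicate (min (cx.getD c 0) (cy.getD c 0)).toNat c] else acc) []
  let res := out.flatten
  if res.length = 0 then "-1"
  else if res.count '0' = res.length then "0"
  else String.ofList res

-- ===== PRECONDITION & SPEC =====
def Spec_solution (X : String) (Y : String) (out : String) : Prop := out = solution_alt X Y
instance (X : String) (Y : String) (out : String) : Decidable (Spec_solution X Y out) := by unfold Spec_solution; infer_instance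

-- ===== CLAIM (what is proved, stated in full; the proofs are below) =====
def Claim_equal_solution : Prop := ∀ (X : String) (Y : String), Dom_solution X Y → Spec_solution X Y (solution X Y)

-- ===== LEMMAS AND PROOFS =====

-- A's loop: the count of each character in the accumulated answer
theorem solA_loop_count (xs : List Char) (ans liy : List Char) (c : Char) :
    (xs.foldl solAStep (ans, liy)).1.count c
      = ans.count c + min (xs.count c) (liy.count c) := by
  induction xs generalizing ans liy with
  | nil => simp
  | cons x xs ih =>
    by_cases hx : x ∈ liy
    · have hrem : PySem.List.remove? liy x = some (liy.erase x) :=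
        PySem.List.remove?_eq_some_erase liy x hx
      simp only [List.foldl_cons, solAStep, hx, if_pos, hrem]
      rw [ih]
      by_cases hc : c = x
      · subst hc
        have h1 : 1 ≤ liy.count c := List.count_pos_iff.mpr hx
        have he : (liy.erase c).count c = liy.count c - 1 := List.count_erase_self ..
        simp [List.count_append, he]
        omega
      · have he : (liy.erase x).count c = liy.count c := List.count_erase_of_ne hc ..
        simp [List.count_append, Ne.symm hc, he]
    · simp only [List.foldl_cons, solAStep, hx, if_neg, not_false_iff]
      rw [ih]
      by_cases hc : c = x
      · subst hc
        have h0 : liy.count c = 0 := List.count_eq_zero.mpr hx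
        simp [h0]
      · simp [Ne.symm hc]

-- the multiset B emits for one descending strictly-sorted key list
theorem flatten_blocks_count (T : List Char) (k : Char → Nat) (c : Char) (hT : T.Nodup) :
    (T.map (fun d => List.replicate (k d) d)).flatten.count c
      = if c ∈ T then k c else 0 := by
  induction T with
  | nil => simp
  | cons t T ih =>
    have hnd := hT
    simp only [List.nodup_cons] at hnd
    simp only [List.map_cons, List.flatten_cons, List.count_append, ih hnd.2]
    by_cases hc : c = t
    · subst hc
      simp [hnd.1]
    · simp [List.count_replicate, hc, Ne.symm hc]

theorem flatten_blocks_sorted (T : List Char) (k : Char → Nat)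
    (hT : T.Pairwise (fun a b => b < a)) :
    (T.map (fun d => List.replicate (k d) d)).flatten.Pairwise (fun a b => b ≤ a) := by
  induction T with
  | nil => simp
  | cons t T ih =>
    simp only [List.pairwise_cons] at hT
    simp only [List.map_cons, List.flatten_cons]
    rw [List.pairwise_append]
    refine ⟨?_, ih hT.2, ?_⟩
    · exact List.pairwise_replicate.mpr (Or.inr le_rfl)
    · intro a ha b hb
      rw [List.eq_of_mem_replicate ha]
      simp only [List.mem_flatten, List.mem_map] at hb
      obtain ⟨l, ⟨d, hd, rfl⟩, hbl⟩ := hb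
      rw [List.eq_of_mem_replicate hbl]
      exact le_of_lt (hT.1 d hd)

theorem solution_eq (X Y : String) : solution X Y = solution_alt X Y := by
  simp only [solution, solution_alt, PySem.Dict.foldl_insert_getD_add_one_eq_counter]
  set lx := X.toList
  set ly := Y.toList
  -- B's pieces
  set T0 := PySem.List.sorted (PySem.Dict.counter lx).keys (fun x => x) true with hT0
  have hkeys : (PySem.Dict.counter lx).keys = (PySem.Set.ofList lx : List Char) :=
    PySem.Dict.keys_counter ..
  have hTmem : ∀ c, c ∈ T0 ↔ c ∈ lx := by
    intro c
    rw [hT0, PySem.List.mem_sorted, hkeys, PySem.Set.mem_ofList]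
  have hTnd : T0.Nodup := by
    have : T0.Perm (PySem.Set.ofList lx : List Char) := by
      rw [hT0, hkeys]; exact PySem.List.sorted_perm ..
    exact this.nodup_iff.mpr (PySem.Set.nodup_ofList lx)
  have hTsorted : T0.Pairwise (fun a b => b ≤ a) := by
    have := PySem.List.sorted_pairwise_rev (κ := Char) (PySem.Dict.counter lx).keys (fun x => x)
    simpa [hT0] using this
  have hTgt : T0.Pairwise (fun a b => b < a) := by
    have := List.Pairwise.and hTsorted hTnd
    exact this.imp (fun h => lt_of_le_of_ne h.1 (Ne.symm h.2))
  -- rewrite B's foldl into filter/map form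
  rw [PySem.List.foldl_append_if]
  simp only [List.nil_append]
  set k : Char → Nat := fun c => min (lx.count c) (ly.count c) with hk
  set T : List Char := T0.filter (fun c => (PySem.Dict.counter ly).contains c) with hT
  have hTnd' : T.Nodup := hTnd.filter _
  have hTgt' : T.Pairwise (fun a b => b < a) := hTgt.filter _
  have hTmem' : ∀ c, c ∈ T ↔ (c ∈ lx ∧ c ∈ ly) := by
    intro c
    rw [hT, List.mem_filter, hTmem, PySem.Dict.contains_counter]
    simp
  have hblk : (T.map fun c =>
        List.replicate ((min ((PySem.Dict.counter lx).getD c 0) ((PySem.Dict.counter ly).getD c 0)).toNat) c)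
      = T.map fun c => List.replicate (k c) c := by
    apply List.map_congr_left
    intro c _
    congr 1
    rw [PySem.Dict.getD_counter, PySem.Dict.getD_counter]
    simp only [hk]
    omega
  rw [hblk]
  set res := (T.map fun c => List.replicate (k c) c).flatten with hres
  -- counts agree
  set ans := (lx.foldl solAStep ([], ly)).1 with hans
  have hcount : ∀ c, ans.count c = res.count c := by
    intro c
    rw [hans, solA_loop_count, hres, flatten_blocks_count T k c hTnd']
    by_cases hc : c ∈ T
    · simp [hc, hk]
    · have : min (lx.count c) (ly.count c) = 0 := by
        rcases (not_iff_not.mpr (hTmem' c)).mp hc |> not_and_or.mp with h | h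
        · simp [List.count_eq_zero.mpr h]
        · simp [List.count_eq_zero.mpr h]
      simp [hc, this]

  have hperm : ans.Perm res := List.perm_iff_count.mpr hcount
  have hlen : ans.length = res.length := hperm.length_eq
  have hcnt0 : ans.count '0' = res.count '0' := hcount '0'
  -- the three branches
  by_cases h1 : ans.length = 0
  · rw [if_pos h1, if_pos (hlen ▸ h1)]
  · rw [if_neg h1, if_neg (fun h => h1 (hlen.trans h))]
    by_cases h2 : ans.length = ans.count '0'
    · rw [if_pos h2, if_pos (by omega)]
    · rw [if_neg h2, if_neg (by omega)]
      -- sorted descending output of A equals B's concatenated blocks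
      congr 1
      have hsorted_res : res.Pairwise (fun a b => b ≤ a) :=
        flatten_blocks_sorted T k hTgt'
      have hsorted_ans : (PySem.List.sorted ans (fun x => x) true).Pairwise (fun a b => b ≤ a) := by
        have := PySem.List.sorted_pairwise_rev (κ := Char) ans (fun x => x)
        simpa using this
      have hperm2 : (PySem.List.sorted ans (fun x => x) true).Perm res :=
        (PySem.List.sorted_perm ..).trans hperm
      exact hperm2.eq_of_pairwise (fun a b _ _ h1 h2 => le_antisymm h2 h1) hsorted_ans hsorted_res

-- ===== VERDICT (by name: the statement is the Claim_ definition above) =====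
theorem solution_spec : Claim_equal_solution := by
  intro X Y _
  unfold Spec_solution
  exact solution_eq X Y
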